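-- pv_equiv track=rewrite | github.com/seankmartin/NeuralConnections | Code/neuroconnect/plot_graph.py | get_colours_extend
-- ===== SOURCE A (Python) =====
-- def get_colours_extend(graph_size, start_set, end_set, source, target, reachable=None):
--     """
--     Get colours for nodes including source and target nodes.
--
--     Blue nodes are those in the source set.
--     Orange nodes are those in the start set, not in the source set.
--     Green nodes are those reachable from the source that are in target.
--     Red nodes are those in target that are not reachable from the source.
--     All other nodes are grey.
--
--     """
--     # Setup the colours
--     c = []
--     if reachable is None:
--         reachable = end_set
--     for acc_val in range(graph_size):
--         if acc_val in start_set: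
--             if acc_val in source:
--                 c.append("dodgerblue")
--             else:
--                 c.append("darkorange")
--         elif acc_val in target:
--             if acc_val in reachable:
--                 c.append("g")
--             else:
--                 c.append("r")
--         else:
--             c.append("gray")
--     return c
-- ===== SOURCE B (Python) =====
-- def get_colours_extend(graph_size, start_set, end_set, source, target, reachable=None):
--     """Colour array built by overwriting: grey base, then target writes, then start_set writes."""
--     if reachable is None:
--         reachable = end_set
--     c = ["gray"] * graph_size
--     for idx in target:
--         if 0 <= idx < graph_size:
--             c[idx] = "g" if idx in reachable else "r"
--     for idx in start_set:
--         if 0 <= idx < graph_size: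
--             c[idx] = "dodgerblue" if idx in source else "darkorange"
--     return c
-- ===== Notes on version B (the rewrite author's own statement) =====
-- stated objective: alternative
-- what changed: Instead of scanning every node in range(graph_size) and testing it against each set, B allocates a gray array once and writes colours in place only at the (in-range) indices of target and then start_set, so start_set overrides target as in A's branch order.
import Mathlib
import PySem

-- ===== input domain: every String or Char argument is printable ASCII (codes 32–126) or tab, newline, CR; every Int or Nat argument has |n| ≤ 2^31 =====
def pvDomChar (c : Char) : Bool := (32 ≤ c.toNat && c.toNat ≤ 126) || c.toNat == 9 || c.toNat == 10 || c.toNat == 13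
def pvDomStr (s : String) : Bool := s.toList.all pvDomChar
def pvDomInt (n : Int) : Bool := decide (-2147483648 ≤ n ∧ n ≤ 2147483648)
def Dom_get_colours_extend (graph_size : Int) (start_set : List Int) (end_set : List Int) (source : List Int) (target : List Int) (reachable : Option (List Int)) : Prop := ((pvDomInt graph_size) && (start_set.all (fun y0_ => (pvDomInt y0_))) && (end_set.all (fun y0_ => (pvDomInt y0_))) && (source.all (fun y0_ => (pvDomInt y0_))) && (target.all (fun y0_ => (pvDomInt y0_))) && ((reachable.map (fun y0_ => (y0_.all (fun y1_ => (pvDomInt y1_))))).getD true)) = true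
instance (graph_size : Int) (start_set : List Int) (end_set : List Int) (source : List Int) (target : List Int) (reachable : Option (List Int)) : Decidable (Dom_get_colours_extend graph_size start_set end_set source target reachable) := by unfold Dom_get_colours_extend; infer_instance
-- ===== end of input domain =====

-- B replaces A's scan of every node in range(graph_size) (with membership tests per node) by a
-- gray array written in place at the in-range indices of target, then start_set (so start_set wins).

-- ===== PORT A =====
def get_colours_extend (graph_size : Int) (start_set : List Int) (end_set : List Int) (source : List Int) (target : List Int) (reachable : Option (List Int)) : List String :=
  let reach := match reachable with
    | none => end_set
    | some r => r
  (PySem.List.pyRange 0 graph_size 1).foldl (fun c acc_val =>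
    if acc_val ∈ start_set then
      if acc_val ∈ source then c ++ ["dodgerblue"] else c ++ ["darkorange"]
    else if acc_val ∈ target then
      if acc_val ∈ reach then c ++ ["g"] else c ++ ["r"]
    else c ++ ["gray"]) []

-- ===== PORT B =====
def get_colours_extend_alt (graph_size : Int) (start_set : List Int) (end_set : List Int) (source : List Int) (target : List Int) (reachable : Option (List Int)) : List String :=
  let reach := reachable.getD end_set
  let c0 := List.replicate graph_size.toNat "gray"
  let c1 := target.foldl (fun c idx =>
    if 0 ≤ idx ∧ idx < graph_size then
      c.set idx.toNat (if idx ∈ reach then "g" else "r")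
    else c) c0
  start_set.foldl (fun c idx =>
    if 0 ≤ idx ∧ idx < graph_size then
      c.set idx.toNat (if idx ∈ source then "dodgerblue" else "darkorange")
    else c) c1

-- ===== PRECONDITION & SPEC =====
def Spec_get_colours_extend (graph_size : Int) (start_set : List Int) (end_set : List Int) (source : List Int) (target : List Int) (reachable : Option (List Int)) (out : List String) : Prop := out = get_colours_extend_alt graph_size start_set end_set source target reachable
instance (graph_size : Int) (start_set : List Int) (end_set : List Int) (source : List Int) (target : List Int) (reachable : Option (List Int)) (out : List String) : Decidable (Spec_get_colours_extend graph_size start_set end_set source target reachable out) := by unfold Spec_get_colours_extend; infer_instance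

-- ===== CLAIM (what is proved, stated in full; the proofs are below) =====
def Claim_equal_get_colours_extend : Prop := ∀ (graph_size : Int) (start_set : List Int) (end_set : List Int) (source : List Int) (target : List Int) (reachable : Option (List Int)), Dom_get_colours_extend graph_size start_set end_set source target reachable → Spec_get_colours_extend graph_size start_set end_set source target reachable (get_colours_extend graph_size start_set end_set source target reachable)

-- ===== LEMMAS AND PROOFS =====

theorem match_getD (o : Option (List Int)) (d : List Int) :
    (match o with | none => d | some r => r) = o.getD d := by
  cases o <;> rfl

-- A's append-loop is map of the per-node colour function.
theorem foldl_append_map {α β : Type} (g : α → β) (l : List α) (acc : List β) :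
    l.foldl (fun c v => c ++ [g v]) acc = acc ++ l.map g := by
  induction l generalizing acc with
  | nil => simp
  | cons x xs ih => simp [List.foldl, ih]

-- B's write-loops: length is preserved.
theorem foldl_set_length (gs : Int) (f : Int → String) (ts : List Int) (c : List String) :
    (ts.foldl (fun acc idx => if 0 ≤ idx ∧ idx < gs then acc.set idx.toNat (f idx) else acc) c).length
      = c.length := by
  induction ts generalizing c with
  | nil => rfl
  | cons t rest ih =>
    simp only [List.foldl]
    split_ifs <;> simp [ih]

-- B's write-loops: final value at i is f ↑i if ↑i occurs in the loop list, else unchanged.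
theorem foldl_set_getElem? (gs : Int) (f : Int → String) (ts : List Int) (c : List String)
    (hc : c.length = gs.toNat) (i : Nat) (hi : i < c.length) :
    getElem? (ts.foldl (fun acc idx => if 0 ≤ idx ∧ idx < gs then acc.set idx.toNat (f idx) else acc) c) i
      = if (i : Int) ∈ ts then some (f i) else getElem? c i := by
  induction ts generalizing c with
  | nil => simp
  | cons t rest ih =>
    simp only [List.foldl]
    by_cases hg : 0 ≤ t ∧ t < gs
    · rw [if_pos hg]
      rw [ih (c.set t.toNat (f t)) (by simpa using hc) (by simpa using hi)]
      by_cases hmem : (i : Int) ∈ rest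
      · simp [hmem]
      · by_cases hti : t = (i : Int)
        · have hmm : (i : Int) ∈ t :: rest := by simp [hti]
          have htn : t.toNat = i := by omega
          rw [if_neg hmem, if_pos hmm, htn]
          simp [hti, hi]
        · have hit : (i : Int) ≠ t := fun h => hti h.symm
          have hmm : ¬ (i : Int) ∈ t :: rest := by simp [hmem, hit]
          rw [if_neg hmem, if_neg hmm]
          exact List.getElem?_set_ne (by omega)
    · rw [if_neg hg]
      have hti : t ≠ (i : Int) := by
        intro h
        have h0 : (0:Int) ≤ t := by omega
        have h1 : t < gs := by omega
        exact hg ⟨h0, h1⟩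
      have hit : (i : Int) ≠ t := fun h => hti h.symm
      rw [ih c hc hi]
      simp [List.mem_cons, hit]

-- the per-node colour A and B both produce
theorem final_get (graph_size : Int) (start_set : List Int) (end_set : List Int)
    (source : List Int) (target : List Int) (reachable : Option (List Int)) (i : Nat)
    (hi : i < graph_size.toNat) :
    getElem? (get_colours_extend_alt graph_size start_set end_set source target reachable) i
      = some (if (i : Int) ∈ start_set then
                (if (i : Int) ∈ source then "dodgerblue" else "darkorange")
              else if (i : Int) ∈ target then
                (if (i : Int) ∈ reachable.getD end_set then "g" else "r")
              else "gray") := by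
  simp only [get_colours_extend_alt]
  rw [foldl_set_getElem? graph_size _ start_set _
        (by rw [foldl_set_length]; simp)
        i (by rw [foldl_set_length]; simpa using hi)]
  rw [foldl_set_getElem? graph_size _ target _ (by simp) i (by simpa using hi)]
  by_cases h1 : (i : Int) ∈ start_set
  · simp [h1]
  · by_cases h2 : (i : Int) ∈ target
    · simp [h1, h2]
    · simp [h1, h2, hi]

-- ===== VERDICT (by name: the statement is the Claim_ definition above) =====
theorem get_colours_extend_spec : Claim_equal_get_colours_extend := by
  intro graph_size start_set end_set source target reachable _
  unfold Spec_get_colours_extend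
  set reach := reachable.getD end_set with hreachdef
  set g : Int → String := fun v =>
    if v ∈ start_set then
      (if v ∈ source then "dodgerblue" else "darkorange")
    else if v ∈ target then
      (if v ∈ reach then "g" else "r")
    else "gray" with hg
  have hA : get_colours_extend graph_size start_set end_set source target reachable
      = (PySem.List.pyRange 0 graph_size 1).map g := by
    simp only [get_colours_extend]
    rw [match_getD reachable end_set, ← hreachdef]
    have hfun : (fun (c : List String) acc_val =>
        if acc_val ∈ start_set then
          if acc_val ∈ source then c ++ ["dodgerblue"] else c ++ ["darkorange"]
        else if acc_val ∈ target then
          if acc_val ∈ reach then c ++ ["g"] else c ++ ["r"]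
        else c ++ ["gray"]) = (fun c v => c ++ [g v]) := by
      funext c v
      simp only [hg]
      split_ifs <;> rfl
    rw [hfun, foldl_append_map]
    simp
  rw [hA]
  apply List.ext_getElem?
  intro i
  by_cases hi : i < graph_size.toNat
  · have hAi : getElem? ((PySem.List.pyRange 0 graph_size 1).map g) i = some (g i) := by
      have h : ((graph_size.toNat : Int)) = graph_size := by omega
      rw [← h]
      exact PySem.List.getElem?_map_pyRange_zero g graph_size.toNat i hi
    rw [hAi, final_get graph_size start_set end_set source target reachable i hi]
  · have h1 : getElem? ((PySem.List.pyRange 0 graph_size 1).map g) i = none := by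
      rw [List.getElem?_eq_none]
      simp only [List.length_map, PySem.List.length_pyRange_one]
      omega
    have h2 : getElem? (get_colours_extend_alt graph_size start_set end_set source target reachable) i = none := by
      rw [List.getElem?_eq_none]
      simp only [get_colours_extend_alt]
      rw [foldl_set_length, foldl_set_length]
      simp only [List.length_replicate]
      omega
    rw [h1, h2]
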